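-- pv_equiv track=rewrite | github.com/kkontras/PID_SSL | workflows/selected_a/run_expanded_method_hparam_search_selected.py | _grid_for_method
-- ===== SOURCE A (Python) =====
-- import itertools
-- from typing import Dict, Iterable, List, Optional, Tuple
--
-- def _grid_for_method(method: str) -> List[Dict[str, str]]:
--     grids: List[Dict[str, str]] = []
--     if method == "simclr":
--         for tau, noise in itertools.product(
--             ["0.03", "0.05", "0.07", "0.1", "0.2", "0.5", "0.8"],
--             ["0.02", "0.05", "0.1", "0.2", "0.3"],
--         ):
--             grids.append({"tau": tau, "view_noise_std": noise})
--     elif method == "pairwise_nce":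
--         for tau in ["0.03", "0.05", "0.07", "0.1", "0.2", "0.4", "0.8"]:
--             grids.append({"tau": tau})
--     elif method == "triangle":
--         for tau, alpha in itertools.product(
--             ["0.03", "0.05", "0.07", "0.1", "0.2", "0.4", "0.8"],
--             ["0.0", "0.1", "0.25", "0.5", "1.0"],
--         ):
--             grids.append({"tau": tau, "triangle_alpha": alpha})
--     elif method == "confu":
--         for tau, fuse in itertools.product(
--             ["0.03", "0.05", "0.07", "0.1", "0.2", "0.4", "0.8"],
--             ["0.1", "0.25", "0.5", "0.75", "0.9"],
--         ):
--             grids.append({"tau": tau, "confu_fuse_weight": fuse})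
--     elif method == "masked_raw":
--         for ratio in ["0.1", "0.2", "0.3", "0.5", "0.7", "0.85"]:
--             grids.append({"mask_ratio": ratio})
--     elif method == "masked_emb":
--         for ratio, ema, var in itertools.product(
--             ["0.1", "0.2", "0.3", "0.5", "0.7"],
--             ["0.99", "0.995", "0.996", "0.999", "0.9995"],
--             ["0.1", "0.25", "1.0", "4.0", "8.0"],
--         ):
--             grids.append({"mask_ratio": ratio, "ema_momentum": ema, "masked_emb_var_weight": var})
--     elif method == "comm":
--         for tau, noise in itertools.product(
--             ["0.03", "0.05", "0.07", "0.1", "0.2", "0.4"],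
--             ["0.02", "0.05", "0.1", "0.2", "0.3"],
--         ):
--             grids.append({"tau": tau, "view_noise_std": noise})
--     elif method == "infmask":
--         for tau, noise, ratio, masks in itertools.product(
--             ["0.03", "0.05", "0.07", "0.1", "0.2", "0.4"],
--             ["0.02", "0.05", "0.1", "0.2"],
--             ["0.1", "0.2", "0.3", "0.5", "0.7", "0.85"],
--             ["1", "2", "4"],
--         ):
--             grids.append({"tau": tau, "view_noise_std": noise, "mask_ratio": ratio, "n_mask_samples": masks})
--     return grids
-- ===== SOURCE B (Python) =====
-- from typing import Dict, List
--
-- _SPECS = {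
--     "simclr": (("tau", "view_noise_std"),
--                [["0.03", "0.05", "0.07", "0.1", "0.2", "0.5", "0.8"],
--                 ["0.02", "0.05", "0.1", "0.2", "0.3"]]),
--     "pairwise_nce": (("tau",),
--                      [["0.03", "0.05", "0.07", "0.1", "0.2", "0.4", "0.8"]]),
--     "triangle": (("tau", "triangle_alpha"),
--                  [["0.03", "0.05", "0.07", "0.1", "0.2", "0.4", "0.8"],
--                   ["0.0", "0.1", "0.25", "0.5", "1.0"]]),
--     "confu": (("tau", "confu_fuse_weight"),
--               [["0.03", "0.05", "0.07", "0.1", "0.2", "0.4", "0.8"],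
--                ["0.1", "0.25", "0.5", "0.75", "0.9"]]),
--     "masked_raw": (("mask_ratio",),
--                    [["0.1", "0.2", "0.3", "0.5", "0.7", "0.85"]]),
--     "masked_emb": (("mask_ratio", "ema_momentum", "masked_emb_var_weight"),
--                    [["0.1", "0.2", "0.3", "0.5", "0.7"],
--                     ["0.99", "0.995", "0.996", "0.999", "0.9995"],
--                     ["0.1", "0.25", "1.0", "4.0", "8.0"]]),
--     "comm": (("tau", "view_noise_std"),
--              [["0.03", "0.05", "0.07", "0.1", "0.2", "0.4"],
--               ["0.02", "0.05", "0.1", "0.2", "0.3"]]),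
--     "infmask": (("tau", "view_noise_std", "mask_ratio", "n_mask_samples"),
--                 [["0.03", "0.05", "0.07", "0.1", "0.2", "0.4"],
--                  ["0.02", "0.05", "0.1", "0.2"],
--                  ["0.1", "0.2", "0.3", "0.5", "0.7", "0.85"],
--                  ["1", "2", "4"]]),
-- }
--
--
-- def _grid_for_method(method: str) -> List[Dict[str, str]]:
--     # Mixed-radix index decoding: combination k is obtained by repeated divmod
--     # of k by the value-list lengths (last list = least significant digit),
--     # which yields exactly itertools.product's order without any nested loops.
--     spec = _SPECS.get(method)
--     if spec is None:
--         return []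
--     names, lists = spec
--     total = 1
--     for vs in lists:
--         total *= len(vs)
--     out = []
--     for k in range(total):
--         rem = k
--         vals = []
--         for vs in reversed(lists):
--             rem, r = divmod(rem, len(vs))
--             vals.append(vs[r])
--         vals.reverse()
--         out.append(dict(zip(names, vals)))
--     return out
-- ===== Notes on version B (the rewrite author's own statement) =====
-- stated objective: alternative
-- what changed: Replaced the eight per-method nested itertools.product loops by a single flat counter loop over range(total) that decodes each combination index k into its parameter values by mixed-radix divmod (last value list = least significant digit), driven by one method->spec table.
import Mathlib
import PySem

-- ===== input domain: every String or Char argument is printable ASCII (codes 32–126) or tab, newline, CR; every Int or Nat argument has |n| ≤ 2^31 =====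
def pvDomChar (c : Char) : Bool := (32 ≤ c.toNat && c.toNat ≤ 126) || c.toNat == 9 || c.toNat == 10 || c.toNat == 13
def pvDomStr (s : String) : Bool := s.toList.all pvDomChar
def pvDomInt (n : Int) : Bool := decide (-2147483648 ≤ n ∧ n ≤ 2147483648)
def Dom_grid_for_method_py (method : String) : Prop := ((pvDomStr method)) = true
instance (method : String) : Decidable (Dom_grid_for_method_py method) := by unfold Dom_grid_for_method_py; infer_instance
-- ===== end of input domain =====

-- B replaces A's eight hard-coded if/elif product loops by one flat counter loop that
-- mixed-radix divmod-decodes each combination index from a method->spec table (objective: alternative).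


-- ===== PORT A =====
-- A: eight if/elif branches, each a nested itertools.product loop appending literal dicts.
def grid_for_method_py (method : String) : List (List (String × String)) :=
  if method == "simclr" then
    (["0.03","0.05","0.07","0.1","0.2","0.5","0.8"].flatMap fun tau =>
      ["0.02","0.05","0.1","0.2","0.3"].map fun noise =>
        [("tau", tau), ("view_noise_std", noise)])
  else if method == "pairwise_nce" then
    (["0.03","0.05","0.07","0.1","0.2","0.4","0.8"].map fun tau => [("tau", tau)])
  else if method == "triangle" then
    (["0.03","0.05","0.07","0.1","0.2","0.4","0.8"].flatMap fun tau =>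
      ["0.0","0.1","0.25","0.5","1.0"].map fun alpha =>
        [("tau", tau), ("triangle_alpha", alpha)])
  else if method == "confu" then
    (["0.03","0.05","0.07","0.1","0.2","0.4","0.8"].flatMap fun tau =>
      ["0.1","0.25","0.5","0.75","0.9"].map fun fuse =>
        [("tau", tau), ("confu_fuse_weight", fuse)])
  else if method == "masked_raw" then
    (["0.1","0.2","0.3","0.5","0.7","0.85"].map fun ratio => [("mask_ratio", ratio)])
  else if method == "masked_emb" then
    (["0.1","0.2","0.3","0.5","0.7"].flatMap fun ratio =>
      ["0.99","0.995","0.996","0.999","0.9995"].flatMap fun ema =>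
        ["0.1","0.25","1.0","4.0","8.0"].map fun var =>
          [("mask_ratio", ratio), ("ema_momentum", ema), ("masked_emb_var_weight", var)])
  else if method == "comm" then
    (["0.03","0.05","0.07","0.1","0.2","0.4"].flatMap fun tau =>
      ["0.02","0.05","0.1","0.2","0.3"].map fun noise =>
        [("tau", tau), ("view_noise_std", noise)])
  else if method == "infmask" then
    (["0.03","0.05","0.07","0.1","0.2","0.4"].flatMap fun tau =>
      ["0.02","0.05","0.1","0.2"].flatMap fun noise =>
        ["0.1","0.2","0.3","0.5","0.7","0.85"].flatMap fun ratio =>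
          ["1","2","4"].map fun masks =>
            [("tau", tau), ("view_noise_std", noise), ("mask_ratio", ratio), ("n_mask_samples", masks)])
  else []

-- ===== PORT B =====
-- B: one table mapping method -> (param names, value lists); _SPECS in Source B.
def pvSpecs : List (String × (List String × List (List String))) :=
  [ ("simclr", (["tau","view_noise_std"],
      [["0.03","0.05","0.07","0.1","0.2","0.5","0.8"],
       ["0.02","0.05","0.1","0.2","0.3"]])),
    ("pairwise_nce", (["tau"],
      [["0.03","0.05","0.07","0.1","0.2","0.4","0.8"]])),
    ("triangle", (["tau","triangle_alpha"],
      [["0.03","0.05","0.07","0.1","0.2","0.4","0.8"],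
       ["0.0","0.1","0.25","0.5","1.0"]])),
    ("confu", (["tau","confu_fuse_weight"],
      [["0.03","0.05","0.07","0.1","0.2","0.4","0.8"],
       ["0.1","0.25","0.5","0.75","0.9"]])),
    ("masked_raw", (["mask_ratio"],
      [["0.1","0.2","0.3","0.5","0.7","0.85"]])),
    ("masked_emb", (["mask_ratio","ema_momentum","masked_emb_var_weight"],
      [["0.1","0.2","0.3","0.5","0.7"],
       ["0.99","0.995","0.996","0.999","0.9995"],
       ["0.1","0.25","1.0","4.0","8.0"]])),
    ("comm", (["tau","view_noise_std"],
      [["0.03","0.05","0.07","0.1","0.2","0.4"],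
       ["0.02","0.05","0.1","0.2","0.3"]])),
    ("infmask", (["tau","view_noise_std","mask_ratio","n_mask_samples"],
      [["0.03","0.05","0.07","0.1","0.2","0.4"],
       ["0.02","0.05","0.1","0.2"],
       ["0.1","0.2","0.3","0.5","0.7","0.85"],
       ["1","2","4"]])) ]

-- One flat loop over range(total); each index k is divmod-decoded, last list least
-- significant, exactly as Source B's inner 'for vs in reversed(lists)' loop.
-- vs[r] is ported as pyGetD vs r "": r = rem % len(vs) is always in range, so the
-- default is never used and this is exact.
def grid_for_method_py_alt (method : String) : List (List (String × String)) :=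
  match List.lookup method pvSpecs with
  | none => []
  | some (names, lists) =>
    let total : Int := lists.foldl (fun t vs => t * (vs.length : Int)) 1
    (PySem.List.pyRange 0 total 1).map fun k =>
      let st := lists.reverse.foldl
        (fun (st : Int × List String) vs =>
          (PySem.Int.floordiv st.1 (vs.length : Int),
           st.2 ++ [PySem.List.pyGetD vs (PySem.Int.mod st.1 (vs.length : Int)) ""]))
        (k, [])
      names.zip st.2.reverse

-- ===== PRECONDITION & SPEC =====
def Spec_grid_for_method_py (method : String) (out : List (List (String × String))) : Prop := out = grid_for_method_py_alt method
instance (method : String) (out : List (List (String × String))) : Decidable (Spec_grid_for_method_py method out) := by unfold Spec_grid_for_method_py; infer_instance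

-- ===== CLAIM =====
def Claim_equal_grid_for_method_py : Prop := ∀ (method : String), Dom_grid_for_method_py method → Spec_grid_for_method_py method (grid_for_method_py method)

-- ===== LEMMAS AND PROOFS =====

-- ===== VERDICT =====
set_option maxRecDepth 16000 in
theorem grid_for_method_py_spec : Claim_equal_grid_for_method_py := by
  intro method _
  unfold Spec_grid_for_method_py grid_for_method_py grid_for_method_py_alt
  by_cases h1 : method = "simclr"; · subst h1; decide
  by_cases h2 : method = "pairwise_nce"; · subst h2; decide
  by_cases h3 : method = "triangle"; · subst h3; decide
  by_cases h4 : method = "confu"; · subst h4; decide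
  by_cases h5 : method = "masked_raw"; · subst h5; decide
  by_cases h6 : method = "masked_emb"; · subst h6; decide
  by_cases h7 : method = "comm"; · subst h7; decide
  by_cases h8 : method = "infmask"; · subst h8; decide
  simp [pvSpecs, List.lookup, beq_eq_false_iff_ne.mpr h1, beq_eq_false_iff_ne.mpr h2, beq_eq_false_iff_ne.mpr h3, beq_eq_false_iff_ne.mpr h4, beq_eq_false_iff_ne.mpr h5, beq_eq_false_iff_ne.mpr h6, beq_eq_false_iff_ne.mpr h7, beq_eq_false_iff_ne.mpr h8]
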